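-- pv_equiv track=rewrite | github.com/collinsakenga/codewars_solutions | 6 kyu/Ka Ka Ka cypher words only vol 1.py | ka_co_ka_de_ka_me
-- ===== SOURCE A (Python) =====
-- def ka_co_ka_de_ka_me(word):
--     res=""
--     temp=""
--     for j in word:
--         if j in "aeiouAEIOU":
--             temp+=j
--         else:
--             res+=temp+"ka"+j if temp else j
--             temp=""
--     return "ka"+res+temp
-- ===== SOURCE B (Python) =====
-- def ka_co_ka_de_ka_me(word):
--     V = "aeiouAEIOU"
--     mid = "".join(c + "ka" if c in V and d not in V else c
--                   for c, d in zip(word, word[1:]))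
--     return "ka" + mid + (word[-1] if word else "")
-- ===== Notes on version B (the rewrite author's own statement) =====
-- stated objective: idiomatic
-- what changed: Replaces A's two mutable string accumulators (pending vowel-run + result) with a stateless one-liner: a join over adjacent character pairs (zip) that inserts the cypher syllable exactly between a vowel and a following consonant, plus the last character.
import Mathlib
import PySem

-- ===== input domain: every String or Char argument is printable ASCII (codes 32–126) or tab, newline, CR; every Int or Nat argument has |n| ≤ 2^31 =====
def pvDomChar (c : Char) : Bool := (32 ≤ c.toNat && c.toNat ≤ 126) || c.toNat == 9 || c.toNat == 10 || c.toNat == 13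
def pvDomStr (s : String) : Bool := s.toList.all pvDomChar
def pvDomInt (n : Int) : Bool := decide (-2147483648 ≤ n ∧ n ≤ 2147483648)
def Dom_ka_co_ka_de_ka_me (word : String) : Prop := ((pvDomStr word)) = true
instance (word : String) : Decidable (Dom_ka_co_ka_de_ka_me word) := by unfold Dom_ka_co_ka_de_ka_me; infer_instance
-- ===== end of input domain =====

-- ===== PORT A =====
-- B rewrites A's two-accumulator scan as a stateless join over adjacent character pairs (idiomatic; same O(n) cost).

-- shared constant: the vowel test `j in "aeiouAEIOU"`
def kaIsVowel (c : Char) : Bool := ['a','e','i','o','u','A','E','I','O','U'].contains c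

-- A's for-loop over the word, with accumulators res and temp (strings as char lists)
def kaLoop : List Char → List Char → List Char → List Char
  | [], res, temp => res ++ temp
  | j :: rest, res, temp =>
    if kaIsVowel j then
      kaLoop rest res (temp ++ [j])
    else
      kaLoop rest (res ++ (if temp ≠ [] then temp ++ ['k','a',j] else [j])) []

def ka_co_ka_de_ka_me (word : String) : String :=
  String.ofList ('k' :: 'a' :: kaLoop word.toList [] [])

-- ===== PORT B =====
-- Source B: "ka" + join over zip(word, word[1:]) + (word[-1] if word else "")
def ka_co_ka_de_ka_me_alt (word : String) : String :=
  String.ofList ('k' :: 'a' ::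
    ((word.toList.zip word.toList.tail).flatMap
      (fun p => if kaIsVowel p.1 && !kaIsVowel p.2 then [p.1, 'k', 'a'] else [p.1])
     ++ (match word.toList.getLast? with | some c => [c] | none => [])))

-- ===== PRECONDITION & SPEC =====
def Spec_ka_co_ka_de_ka_me (word : String) (out : String) : Prop := out = ka_co_ka_de_ka_me_alt word
instance (word : String) (out : String) : Decidable (Spec_ka_co_ka_de_ka_me word out) := by unfold Spec_ka_co_ka_de_ka_me; infer_instance

-- ===== CLAIM (what is proved, stated in full; the proofs are below) =====
def Claim_equal_ka_co_ka_de_ka_me : Prop := ∀ (word : String), Dom_ka_co_ka_de_ka_me word → Spec_ka_co_ka_de_ka_me word (ka_co_ka_de_ka_me word)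

-- ===== LEMMAS AND PROOFS =====

-- the pairwise core of B, as a plain recursion
def kaCore : List Char → List Char
  | [] => []
  | [c] => [c]
  | c :: d :: rest =>
    (if kaIsVowel c && !kaIsVowel d then [c, 'k', 'a'] else [c]) ++ kaCore (d :: rest)

theorem kaAlt_eq_core (cs : List Char) :
    (cs.zip cs.tail).flatMap
      (fun p => if kaIsVowel p.1 && !kaIsVowel p.2 then [p.1, 'k', 'a'] else [p.1])
      ++ (match cs.getLast? with | some c => [c] | none => []) = kaCore cs := by
  match cs with
  | [] => simp [kaCore]
  | [c] => simp [kaCore]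
  | c :: d :: rest =>
    simp only [List.tail_cons, List.zip_cons_cons, List.flatMap_cons, kaCore,
      List.getLast?_cons_cons, List.append_assoc]
    rw [← kaAlt_eq_core (d :: rest)]
    simp

theorem kaCore_vowels (temp : List Char) (h : ∀ c ∈ temp, kaIsVowel c = true) :
    kaCore temp = temp := by
  match temp with
  | [] => rfl
  | [c] => rfl
  | c :: d :: rest =>
    have hd : kaIsVowel d = true := h d (by simp)
    rw [kaCore, kaCore_vowels (d :: rest) (fun x hx => h x (List.mem_cons_of_mem _ hx))]
    simp [hd]

theorem kaCore_cons_consonant (j : Char) (rest : List Char) (hj : kaIsVowel j = false) :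
    kaCore (j :: rest) = j :: kaCore rest := by
  match rest with
  | [] => rfl
  | d :: rest' => simp [kaCore, hj]

theorem kaCore_run (temp : List Char) (j : Char) (rest : List Char)
    (hne : temp ≠ []) (hv : ∀ c ∈ temp, kaIsVowel c = true) (hj : kaIsVowel j = false) :
    kaCore (temp ++ j :: rest) = temp ++ ['k', 'a', j] ++ kaCore rest := by
  match temp with
  | [] => exact absurd rfl hne
  | [t] =>
    have ht : kaIsVowel t = true := hv t (by simp)
    simp [kaCore, ht, hj, kaCore_cons_consonant j rest hj]
  | t :: u :: ts =>
    have ht : kaIsVowel t = true := hv t (by simp)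
    have hu : kaIsVowel u = true := hv u (by simp)
    have ih := kaCore_run (u :: ts) j rest (by simp) (fun x hx => hv x (List.mem_cons_of_mem _ hx)) hj
    simp only [List.cons_append] at ih
    simp [kaCore, hu, ih]

theorem kaLoop_eq (cs : List Char) : ∀ (res temp : List Char),
    (∀ c ∈ temp, kaIsVowel c = true) →
    kaLoop cs res temp = res ++ kaCore (temp ++ cs) := by
  induction cs with
  | nil =>
    intro res temp hv
    simp [kaLoop, kaCore_vowels temp hv]
  | cons j rest ih =>
    intro res temp hv
    by_cases hj : kaIsVowel j = true
    · simp only [kaLoop, hj, if_true]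
      rw [ih res (temp ++ [j]) (by
        intro c hc
        rcases List.mem_append.1 hc with h | h
        · exact hv c h
        · rw [List.mem_singleton] at h; exact h ▸ hj)]
      simp
    · have hj' : kaIsVowel j = false := by simpa using hj
      simp only [kaLoop, hj', Bool.false_eq_true, if_false]
      by_cases ht : temp = []
      · subst ht
        rw [ih _ [] (by simp)]
        simp [kaCore_cons_consonant j rest hj']
      · simp only [if_pos ht]
        rw [ih _ [] (by simp)]
        simp only [List.nil_append]
        rw [kaCore_run temp j rest ht hv hj']
        simp

-- ===== VERDICT (by name: the statement is the Claim_ definition above) =====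
theorem ka_co_ka_de_ka_me_spec : Claim_equal_ka_co_ka_de_ka_me := by
  intro word _
  unfold Spec_ka_co_ka_de_ka_me ka_co_ka_de_ka_me ka_co_ka_de_ka_me_alt
  rw [kaAlt_eq_core, kaLoop_eq word.toList [] [] (by simp)]
  simp
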